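-- pv_equiv track=rewrite | github.com/lonelywolf1981/AdventToCode | 2024/day20/solution.py | parse
-- ===== SOURCE A (Python) =====
-- def parse(data: str):
--     grid = [list(line) for line in data.splitlines() if line.strip()]
--     R, C = len(grid), len(grid[0])
--     S = E = None
--     for r in range(R):
--         for c in range(C):
--             if grid[r][c] == "S":
--                 S = (r,c)
--             elif grid[r][c] == "E":
--                 E = (r,c)
--     return grid, R, C, S, E
-- ===== SOURCE B (Python) =====
-- def parse(data: str):
--     grid = [list(line) for line in data.splitlines() if line.strip()]
--     R, C = len(grid), len(grid[0])
--
--     def locate(ch):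
--         # last occurrence in row-major order = first hit scanning backwards
--         for r in range(R - 1, -1, -1):
--             for c in range(C - 1, -1, -1):
--                 if grid[r][c] == ch:
--                     return (r, c)
--         return None
--
--     return grid, R, C, locate("S"), locate("E")
-- ===== Notes on version B (the rewrite author's own statement) =====
-- stated objective: alternative
-- what changed: Replaces A's single forward scan that keeps overwriting two accumulators with two independent backward searches (range(R-1,-1,-1)/range(C-1,-1,-1)) that return the first hit found, i.e. the last occurrence, with early exit.
import Mathlib
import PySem

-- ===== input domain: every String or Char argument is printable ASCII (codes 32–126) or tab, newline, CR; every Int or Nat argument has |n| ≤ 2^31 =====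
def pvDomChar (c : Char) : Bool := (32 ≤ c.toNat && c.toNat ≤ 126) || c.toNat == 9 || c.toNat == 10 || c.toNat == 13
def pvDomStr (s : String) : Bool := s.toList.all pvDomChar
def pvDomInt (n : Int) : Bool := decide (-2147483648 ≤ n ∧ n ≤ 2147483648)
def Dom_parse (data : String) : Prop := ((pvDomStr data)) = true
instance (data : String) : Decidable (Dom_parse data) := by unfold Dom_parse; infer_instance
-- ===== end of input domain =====

-- B replaces A's forward scan with two overwriting accumulators by two independent
-- backward searches with early exit (first hit scanning backwards = last occurrence).

-- ===== PORT A =====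
-- shared first line of both Pythons: grid = [list(line) for line in data.splitlines() if line.strip()]
def pvGridOf (data : String) : List (List String) :=
  ((PySem.Str.splitlines data).filter (fun line => !(PySem.Str.strip line == ""))).map
    (fun line => line.toList.map (fun c => String.ofList [c]))

def parse (data : String) : List (List String) × Int × Int × (Option (Int × Int)) × (Option (Int × Int)) :=
  let grid := pvGridOf data
  let R : Int := grid.length
  let C : Int := (PySem.List.pyGetD grid 0 []).length     -- grid[0]: IndexError on empty grid, excluded by Pre_
  let se := (PySem.List.pyRange 0 R 1).foldl
    (fun (se : Option (Int × Int) × Option (Int × Int)) r =>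
      (PySem.List.pyRange 0 C 1).foldl
        (fun se c =>
          -- grid[r][c]: IndexError on a short row, excluded by Pre_
          if PySem.List.pyGetD (PySem.List.pyGetD grid r []) c "" == "S" then (some (r, c), se.2)
          else if PySem.List.pyGetD (PySem.List.pyGetD grid r []) c "" == "E" then (se.1, some (r, c))
          else se) se)
    ((none, none) : Option (Int × Int) × Option (Int × Int))
  (grid, R, C, se.1, se.2)

-- ===== PORT B =====
-- locate(ch): for r in range(R-1,-1,-1): for c in range(C-1,-1,-1): if grid[r][c]==ch: return (r,c); return None
-- (a for-loop with an early return is ported as findSome?)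
def pvLocate (grid : List (List String)) (R C : Int) (ch : String) : Option (Int × Int) :=
  (PySem.List.pyRange (R - 1) (-1) (-1)).findSome? (fun r =>
    (PySem.List.pyRange (C - 1) (-1) (-1)).findSome? (fun c =>
      if PySem.List.pyGetD (PySem.List.pyGetD grid r []) c "" == ch then some (r, c) else none))

def parse_alt (data : String) : List (List String) × Int × Int × (Option (Int × Int)) × (Option (Int × Int)) :=
  let grid := pvGridOf data
  let R : Int := grid.length
  let C : Int := (PySem.List.pyGetD grid 0 []).length     -- grid[0]: IndexError on empty grid, excluded by Pre_
  (grid, R, C, pvLocate grid R C "S", pvLocate grid R C "E")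

-- ===== PRECONDITION & SPEC =====
-- Pre_ excludes exactly the inputs where A raises IndexError: no non-blank line at all (grid[0]),
-- or some non-blank line shorter than the first one (grid[r][c] with c < len(grid[0])).
def Pre_parse (data : String) : Prop :=
  ((PySem.Str.splitlines data).filter (fun line => !(PySem.Str.strip line == ""))) ≠ [] ∧
  ∀ line ∈ (PySem.Str.splitlines data).filter (fun line => !(PySem.Str.strip line == "")),
    ((((PySem.Str.splitlines data).filter (fun line => !(PySem.Str.strip line == ""))).headD "").toList.length
      ≤ line.toList.length)
instance (data : String) : Decidable (Pre_parse data) := by unfold Pre_parse; infer_instance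

def pvWitness_parse : String := "S.\n.E"

def Spec_parse (data : String) (out : List (List String) × Int × Int × (Option (Int × Int)) × (Option (Int × Int))) : Prop := out = parse_alt data
instance (data : String) (out : List (List String) × Int × Int × (Option (Int × Int)) × (Option (Int × Int))) : Decidable (Spec_parse data out) := by unfold Spec_parse; infer_instance

-- ===== CLAIM (what is proved, stated in full; the proofs are below) =====
def Claim_equal_parse : Prop := ∀ (data : String), Dom_parse data → Pre_parse data → Spec_parse data (parse data)

-- ===== LEMMAS AND PROOFS =====

-- the last cell equal to k in row-major order, as a spec both sides are reduced to
def pvLast (l : List (String × (Int × Int))) (k : String) : Option (Int × Int) :=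
  (l.reverse.find? (fun p => p.1 == k)).map (·.2)

def pvCells (grid : List (List String)) (Cn : Nat) : List (String × (Int × Int)) :=
  (PySem.List.enumerate grid 0).flatMap
    (fun rrow => (PySem.List.enumerate (rrow.2.take Cn) 0).map (fun cch => (cch.2, (rrow.1, cch.1))))

theorem pvLast_append (t : List (String × (Int × Int))) (p : String × (Int × Int)) (k : String) :
    pvLast (t ++ [p]) k = if p.1 == k then some p.2 else pvLast t k := by
  simp only [pvLast, List.reverse_append, List.reverse_cons, List.reverse_nil, List.nil_append,
    List.cons_append, List.find?]
  cases h : (p.1 == k)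
  · simp
  · simp

theorem pv_I2 (l : List (String × (Int × Int))) (z : Option (Int × Int) × Option (Int × Int)) :
    l.foldl (fun se p => if p.1 == "S" then (some p.2, se.2)
                         else if p.1 == "E" then (se.1, some p.2) else se) z
    = ((pvLast l "S").or z.1, (pvLast l "E").or z.2) := by
  induction l using List.reverseRecOn with
  | nil => simp [pvLast]
  | append_singleton t p ih =>
    rw [List.foldl_append, pvLast_append, pvLast_append]
    simp only [List.foldl, ih]
    by_cases hs : p.1 = "S"
    · simp [hs]
    · by_cases he : p.1 = "E" <;> simp [hs, he]

theorem pv_Aside (grid : List (List String)) (Cn : Nat)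
    (h : ∀ row ∈ grid, Cn ≤ row.length) (z : Option (Int × Int) × Option (Int × Int)) :
    (PySem.List.pyRange 0 (grid.length : Int) 1).foldl
      (fun (se : Option (Int × Int) × Option (Int × Int)) r =>
        (PySem.List.pyRange 0 (Cn : Int) 1).foldl
          (fun se c =>
            if PySem.List.pyGetD (PySem.List.pyGetD grid r []) c "" == "S" then (some (r, c), se.2)
            else if PySem.List.pyGetD (PySem.List.pyGetD grid r []) c "" == "E" then (se.1, some (r, c))
            else se) se) z
    = (pvCells grid Cn).foldl
        (fun se p => if p.1 == "S" then (some p.2, se.2)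
                     else if p.1 == "E" then (se.1, some p.2) else se) z := by
  unfold pvCells
  rw [List.foldl_flatMap, PySem.List.enumerate_eq_map_pyRange grid [], List.foldl_map]
  have hlen : PySem.List.len grid = (grid.length : Int) := rfl
  rw [hlen]
  apply PySem.List.foldl_congr_mem
  intro acc r hr
  obtain ⟨hr0, hrlt⟩ := PySem.List.mem_pyRange_one.mp hr
  have hrow : PySem.List.pyGetD grid r [] = grid[r.toNat] :=
    PySem.List.pyGetD_eq_getElem grid [] hr0 hrlt
  have hmem : grid[r.toNat] ∈ grid := by
    exact List.getElem_mem _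
  have hC : Cn ≤ (PySem.List.pyGetD grid r []).length := by rw [hrow]; exact h _ hmem
  have htk : ((PySem.List.pyGetD grid r []).take Cn).length = Cn := by
    simp [List.length_take]; omega
  rw [PySem.List.enumerate_eq_map_pyRange ((PySem.List.pyGetD grid r []).take Cn) "",
      List.foldl_map, List.foldl_map]
  have hlen2 : PySem.List.len ((PySem.List.pyGetD grid r []).take Cn) = (Cn : Int) := by
    show ((((PySem.List.pyGetD grid r []).take Cn).length : Nat) : Int) = (Cn : Int)
    rw [htk]
  rw [hlen2]
  apply PySem.List.foldl_congr_mem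
  intro acc2 c hc
  obtain ⟨hc0, hclt⟩ := PySem.List.mem_pyRange_one.mp hc
  have hclt' : c < (((PySem.List.pyGetD grid r []).take Cn).length : Int) := by
    rw [htk]; exact hclt
  have hclt'' : c < ((PySem.List.pyGetD grid r []).length : Int) := by
    push_cast at hclt' ⊢
    omega
  rw [PySem.List.pyGetD_eq_getElem _ _ hc0 hclt', PySem.List.pyGetD_eq_getElem _ _ hc0 hclt'']
  simp [List.getElem_take]

-- ===== B-side lemmas =====

theorem pv_findSome?_congr_mem {α β : Type} (l : List α) (f g : α → Option β)
    (h : ∀ x ∈ l, f x = g x) : l.findSome? f = l.findSome? g := by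
  induction l with
  | nil => rfl
  | cons x t ih =>
    simp only [List.findSome?]
    rw [h x (by simp)]
    cases g x with
    | none => exact ih (fun y hy => h y (by simp [hy]))
    | some b => rfl

theorem pv_find?_map_eq_findSome? (l : List (String × (Int × Int))) (k : String) :
    (l.find? (fun p => p.1 == k)).map (·.2)
      = l.findSome? (fun p => if p.1 == k then some p.2 else none) := by
  induction l with
  | nil => rfl
  | cons p t ih =>
    simp only [List.find?, List.findSome?]
    cases h : (p.1 == k)
    · simpa [h] using ih
    · simp

theorem pv_flatMap_reverse_findSome? {α β γ : Type} (l : List α) (g : α → List γ)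
    (f : γ → Option β) :
    ((l.flatMap g).reverse.findSome? f)
      = l.reverse.findSome? (fun x => (g x).reverse.findSome? f) := by
  induction l with
  | nil => rfl
  | cons x t ih =>
    simp only [List.flatMap_cons, List.reverse_append, List.reverse_cons,
      List.findSome?_append, ih, List.findSome?]
    cases List.findSome? f (g x).reverse <;> rfl

theorem pv_Bside (grid : List (List String)) (Cn : Nat)
    (h : ∀ row ∈ grid, Cn ≤ row.length) (ch : String) :
    pvLocate grid (grid.length : Int) (Cn : Int) ch = pvLast (pvCells grid Cn) ch := by
  unfold pvLocate pvLast pvCells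
  rw [pv_find?_map_eq_findSome?, pv_flatMap_reverse_findSome?]
  rw [PySem.List.enumerate_eq_map_pyRange grid []]
  have hlen : PySem.List.len grid = (grid.length : Int) := rfl
  rw [hlen, ← List.map_reverse, List.findSome?_map]
  have hr1 : PySem.List.pyRange ((grid.length : Int) - 1) (-1) (-1)
      = (PySem.List.pyRange 0 (grid.length : Int) 1).reverse := by
    rw [PySem.List.pyRange_neg_one_eq_reverse]
    norm_num
  rw [hr1]
  apply pv_findSome?_congr_mem
  intro r hr
  obtain ⟨hr0, hrlt⟩ := PySem.List.mem_pyRange_one.mp (List.mem_reverse.mp hr)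
  simp only [Function.comp]
  have hrow : PySem.List.pyGetD grid r [] = grid[r.toNat] :=
    PySem.List.pyGetD_eq_getElem grid [] hr0 hrlt
  have hC : Cn ≤ (PySem.List.pyGetD grid r []).length := by
    rw [hrow]; exact h _ (List.getElem_mem _)
  have htk : ((PySem.List.pyGetD grid r []).take Cn).length = Cn := by
    simp [List.length_take]; omega
  rw [PySem.List.enumerate_eq_map_pyRange ((PySem.List.pyGetD grid r []).take Cn) ""]
  have hlen2 : PySem.List.len ((PySem.List.pyGetD grid r []).take Cn) = (Cn : Int) := by
    show ((((PySem.List.pyGetD grid r []).take Cn).length : Nat) : Int) = (Cn : Int)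
    rw [htk]
  rw [hlen2, ← List.map_reverse, List.findSome?_map, ← List.map_reverse, List.findSome?_map]
  have hc1 : PySem.List.pyRange ((Cn : Int) - 1) (-1) (-1)
      = (PySem.List.pyRange 0 (Cn : Int) 1).reverse := by
    rw [PySem.List.pyRange_neg_one_eq_reverse]
    norm_num
  rw [hc1]
  apply pv_findSome?_congr_mem
  intro c hc
  obtain ⟨hc0, hclt⟩ := PySem.List.mem_pyRange_one.mp (List.mem_reverse.mp hc)
  simp only [Function.comp]
  have hclt' : c < (((PySem.List.pyGetD grid r []).take Cn).length : Int) := by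
    rw [htk]; exact hclt
  have hclt'' : c < ((PySem.List.pyGetD grid r []).length : Int) := by
    push_cast at hclt' ⊢; omega
  rw [PySem.List.pyGetD_eq_getElem _ _ hc0 hclt', PySem.List.pyGetD_eq_getElem _ _ hc0 hclt'']
  simp [List.getElem_take]

-- ===== VERDICT (by name: the statement is the Claim_ definition above) =====

theorem parse_spec : Claim_equal_parse := by
  intro data _ hpre
  unfold Spec_parse parse parse_alt
  obtain ⟨hne, hlen⟩ := hpre
  obtain ⟨l0, rest, hl⟩ := List.exists_cons_of_ne_nil hne
  have hgrid : pvGridOf data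
      = (l0.toList.map (fun c => String.ofList [c])) :: rest.map (fun line => line.toList.map (fun c => String.ofList [c])) := by
    unfold pvGridOf; rw [hl]; rfl
  have hget0 : PySem.List.pyGetD (pvGridOf data) 0 [] = l0.toList.map (fun c => String.ofList [c]) := by
    rw [hgrid, PySem.List.pyGetD_zero_cons]
  have hCn : (PySem.List.pyGetD (pvGridOf data) 0 []).length = l0.toList.length := by
    rw [hget0, List.length_map]
  have hC : ∀ row ∈ pvGridOf data, (PySem.List.pyGetD (pvGridOf data) 0 []).length ≤ row.length := by
    intro row hrow
    unfold pvGridOf at hrow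
    obtain ⟨line, hline, hrw⟩ := List.mem_map.mp hrow
    have := hlen line hline
    rw [hl] at this
    rw [hCn, ← hrw, List.length_map]
    simpa using this
  show (pvGridOf data, _, _, _, _) = (pvGridOf data, _, _, _, _)
  rw [pv_Aside (pvGridOf data) _ hC, pv_I2,
      pv_Bside (pvGridOf data) _ hC, pv_Bside (pvGridOf data) _ hC]
  simp
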